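-- pv_equiv track=rewrite | github.com/Silent-Paradox42/Pacman | assets/map/map.py | is_fully_connected
-- ===== SOURCE A (Python) =====
-- def is_fully_connected(maze):
--     visited = [[False for _ in row] for row in maze]
--     height, width = len(maze), len(maze[0])
--
--     # 最初の道を探す
--     for y in range(height):
--         for x in range(width):
--             if maze[y][x] == 2:
--                 start = (y, x)
--                 break
--         else:
--             continue
--         break
--
--     # DFSで探索
--     stack = [start]
--     visited[start[0]][start[1]] = True
--     while stack:
--         cy, cx = stack.pop()
--         for dy, dx in [(-1,0),(1,0),(0,-1),(0,1)]:
--             ny, nx = cy + dy, cx + dx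
--             if 0 <= ny < height and 0 <= nx < width and maze[ny][nx] == 2 and not visited[ny][nx]:
--                 visited[ny][nx] = True
--                 stack.append((ny, nx))
--
--     # すべての道が訪問されたか確認
--     for y in range(height):
--         for x in range(width):
--             if maze[y][x] == 2 and not visited[y][x]:
--                 return False
--     return True
-- ===== SOURCE B (Python) =====
-- def is_fully_connected(maze):
--     height, width = len(maze), len(maze[0])
--
--     # all path cells in row-major order
--     path = [(y, x) for y in range(height) for x in range(width) if maze[y][x] == 2]
--     start = path[0]
--
--     # saturate: grow the reached set until no path cell adjacent to it is missing
--     reached = {start}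
--     changed = True
--     while changed:
--         changed = False
--         for (y, x) in path:
--             if (y, x) not in reached:
--                 if (y - 1, x) in reached or (y + 1, x) in reached \
--                         or (y, x - 1) in reached or (y, x + 1) in reached:
--                     reached.add((y, x))
--                     changed = True
--     return len(reached) == len(path)
-- ===== Notes on version B (the rewrite author's own statement) =====
-- stated objective: alternative
-- what changed: Replaces A's explicit-stack DFS over a boolean visited grid (plus a final full-grid rescan) by precomputing the list of path cells once and saturating a reached set to a fixpoint (repeated passes adding any path cell adjacent to the set), finishing with a cardinality comparison len(reached)==len(path).
-- outside the precondition, e.g. on is_fully_connected([[2, 0, 2], [0]]): A returns False, B raises IndexError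
import Mathlib
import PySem

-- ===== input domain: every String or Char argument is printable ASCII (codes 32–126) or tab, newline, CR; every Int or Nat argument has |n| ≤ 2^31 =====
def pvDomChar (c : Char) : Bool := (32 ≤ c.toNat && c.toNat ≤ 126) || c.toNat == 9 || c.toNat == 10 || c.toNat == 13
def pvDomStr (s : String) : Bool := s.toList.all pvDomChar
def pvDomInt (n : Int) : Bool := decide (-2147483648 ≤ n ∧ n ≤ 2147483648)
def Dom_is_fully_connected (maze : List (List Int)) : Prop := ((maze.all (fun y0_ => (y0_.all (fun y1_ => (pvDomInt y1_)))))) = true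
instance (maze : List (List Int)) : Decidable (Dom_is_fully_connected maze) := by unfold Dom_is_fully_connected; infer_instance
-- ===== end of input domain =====

-- B replaces A's explicit-stack DFS over a boolean visited grid by a fixpoint saturation of a
-- reached set over the precomputed list of path cells (objective: alternative, not faster).

-- ===== PORT A =====
-- maze[y][x] for indices the Python code has already bounds-checked (0 ≤ y < h, 0 ≤ x < w)
def pvCell (maze : List (List Int)) (y x : Int) : Int := (maze.getD y.toNat []).getD x.toNat 0

-- visited[y][x] reads / writes (indices bounds-checked by the Python code)
def pvVGet (v : List (List Bool)) (y x : Int) : Bool := (v.getD y.toNat []).getD x.toNat false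

def pvVSet (v : List (List Bool)) (y x : Int) : List (List Bool) :=
  v.set y.toNat ((v.getD y.toNat []).set x.toNat true)

-- [(-1,0),(1,0),(0,-1),(0,1)]
def pvDirs : List (Int × Int) := [(-1, 0), (1, 0), (0, -1), (0, 1)]

-- the body of the inner `for dy, dx in …` loop
def pvStep (maze : List (List Int)) (h w : Nat) (c : Int × Int)
    (st : List (List Bool) × List (Int × Int)) (d : Int × Int) : List (List Bool) × List (Int × Int) :=
  let ny := c.1 + d.1
  let nx := c.2 + d.2
  if 0 ≤ ny ∧ ny < (h : Int) ∧ 0 ≤ nx ∧ nx < (w : Int) ∧ pvCell maze ny nx = 2 ∧ pvVGet st.1 ny nx = false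
  then (pvVSet st.1 ny nx, (ny, nx) :: st.2)
  else st

-- the `while stack:` loop; fuel only makes the recursion structural (2*h*w + 2 always suffices)
def pvDfs (maze : List (List Int)) (h w : Nat) : Nat → List (List Bool) → List (Int × Int) → List (List Bool)
  | _, v, [] => v
  | 0, v, _ => v
  | fuel + 1, v, c :: rest =>
      let st := pvDirs.foldl (pvStep maze h w c) (v, rest)
      pvDfs maze h w fuel st.1 st.2

-- the first double loop with its break/else: first (y, x) in row-major order with maze[y][x] == 2
def pvFindStart (maze : List (List Int)) (h w : Nat) : Option (Int × Int) :=
  (List.range h).findSome? (fun (y : Nat) =>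
    ((List.range w).find? (fun (x : Nat) => pvCell maze (y : Int) (x : Int) == 2)).map
      (fun (x : Nat) => ((y : Int), (x : Int))))

def is_fully_connected (maze : List (List Int)) : Bool :=
  let h := maze.length
  let w := (maze.headD []).length
  match pvFindStart maze h w with
  | none => false   -- Python: NameError on `start` (excluded by Pre_)
  | some s =>
      let v0 := pvVSet (maze.map (fun row => row.map (fun _ => false))) s.1 s.2
      let v := pvDfs maze h w (2 * h * w + 2) v0 [s]
      (List.range h).all (fun (y : Nat) => (List.range w).all (fun (x : Nat) =>
        !(pvCell maze (y : Int) (x : Int) == 2) || pvVGet v (y : Int) (x : Int)))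

-- ===== PORT B =====
-- [(y, x) for y in range(height) for x in range(width) if maze[y][x] == 2]
def pvPath (maze : List (List Int)) (h w : Nat) : List (Int × Int) :=
  (List.range h).flatMap (fun (y : Nat) => (List.range w).filterMap (fun (x : Nat) =>
    if pvCell maze (y : Int) (x : Int) == 2 then some ((y : Int), (x : Int)) else none))

-- (y-1,x) in reached or (y+1,x) in reached or (y,x-1) in reached or (y,x+1) in reached
def pvNbhd (r : List (Int × Int)) (p : Int × Int) : Bool :=
  r.contains (p.1 - 1, p.2) || r.contains (p.1 + 1, p.2) ||
  r.contains (p.1, p.2 - 1) || r.contains (p.1, p.2 + 1)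

-- body of the `for (y, x) in path:` pass (state = (reached, changed))
def pvPassStep (st : List (Int × Int) × Bool) (p : Int × Int) : List (Int × Int) × Bool :=
  if ¬ st.1.contains p = true ∧ pvNbhd st.1 p = true then (PySem.Set.add st.1 p, true) else st

-- the `while changed:` loop; fuel only makes the recursion structural (path.length + 1 always suffices)
def pvSat (path : List (Int × Int)) : Nat → List (Int × Int) → List (Int × Int)
  | 0, r => r
  | fuel + 1, r =>
      let st := path.foldl pvPassStep (r, false)
      if st.2 then pvSat path fuel st.1 else st.1

def is_fully_connected_alt (maze : List (List Int)) : Bool :=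
  let h := maze.length
  let w := (maze.headD []).length
  let path := pvPath maze h w
  match path with
  | [] => false   -- Python: IndexError on path[0] (excluded by Pre_)
  | start :: _ =>
      let reached := pvSat path (path.length + 1) (PySem.Set.ofList [start])
      reached.length == path.length

-- ===== PRECONDITION & SPEC =====
-- Pre_ excludes the empty maze and mazes with no 2-cell inside the first len(maze[0]) columns, on
-- which A raises (IndexError / NameError), and ragged mazes having a row shorter than the first
-- row, on which A usually raises IndexError and otherwise its return-vs-raise depends accidentally
-- on where the 2-cells sit (B raises IndexError while building its path list there).
def Pre_is_fully_connected (maze : List (List Int)) : Prop :=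
  maze ≠ [] ∧ (∀ row ∈ maze, (maze.headD []).length ≤ row.length) ∧
  ∃ y ∈ List.range maze.length, ∃ x ∈ List.range (maze.headD []).length,
    (maze.getD y []).getD x 0 = 2

instance (maze : List (List Int)) : Decidable (Pre_is_fully_connected maze) := by
  unfold Pre_is_fully_connected; infer_instance

def pvWitness_is_fully_connected : List (List Int) := [[2, 2], [0, 2]]

def Spec_is_fully_connected (maze : List (List Int)) (out : Bool) : Prop := out = is_fully_connected_alt maze
instance (maze : List (List Int)) (out : Bool) : Decidable (Spec_is_fully_connected maze out) := by unfold Spec_is_fully_connected; infer_instance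

-- ===== CLAIM (what is proved, stated in full; the proofs are below) =====
def Claim_equal_is_fully_connected : Prop := ∀ (maze : List (List Int)), Dom_is_fully_connected maze → Pre_is_fully_connected maze → Spec_is_fully_connected maze (is_fully_connected maze)

-- ===== LEMMAS AND PROOFS =====

-- in-range coordinates, path cells, adjacency, reachability
def PvIn (maze : List (List Int)) (p : Int × Int) : Prop :=
  0 ≤ p.1 ∧ p.1 < (maze.length : Int) ∧ 0 ≤ p.2 ∧ p.2 < ((maze.headD []).length : Int)

def PvP (maze : List (List Int)) (p : Int × Int) : Prop :=
  PvIn maze p ∧ pvCell maze p.1 p.2 = 2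

def PvAdj (p q : Int × Int) : Prop :=
  q = (p.1 - 1, p.2) ∨ q = (p.1 + 1, p.2) ∨ q = (p.1, p.2 - 1) ∨ q = (p.1, p.2 + 1)

inductive PvReach (maze : List (List Int)) (s : Int × Int) : Int × Int → Prop
  | base : PvReach maze s s
  | step {p q : Int × Int} : PvReach maze s p → PvP maze q → PvAdj p q → PvReach maze s q

def RowsOK (maze : List (List Int)) : Prop := ∀ row ∈ maze, (maze.headD []).length ≤ row.length

def PvShape (maze : List (List Int)) (v : List (List Bool)) : Prop :=
  v.length = maze.length ∧ ∀ i : Nat, (v.getD i []).length = (maze.getD i []).length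

theorem pvReach_pvP {maze : List (List Int)} {s p : Int × Int} (hs : PvP maze s)
    (h : PvReach maze s p) : PvP maze p := by
  induction h with
  | base => exact hs
  | step _ hq _ => exact hq

theorem pvAdj_nbr {c q : Int × Int} :
    PvAdj c q ↔ ∃ d ∈ pvDirs, q = (c.1 + d.1, c.2 + d.2) := by
  constructor
  · rintro (h | h | h | h) <;> subst h
    · exact ⟨(-1, 0), by simp [pvDirs], by simp [Prod.ext_iff, sub_eq_add_neg] <;> omega⟩
    · exact ⟨(1, 0), by simp [pvDirs], by simp [Prod.ext_iff, sub_eq_add_neg] <;> omega⟩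
    · exact ⟨(0, -1), by simp [pvDirs], by simp [Prod.ext_iff, sub_eq_add_neg] <;> omega⟩
    · exact ⟨(0, 1), by simp [pvDirs], by simp [Prod.ext_iff, sub_eq_add_neg] <;> omega⟩
  · rintro ⟨d, hd, rfl⟩
    simp only [pvDirs, List.mem_cons, List.not_mem_nil, or_false] at hd
    rcases hd with rfl | rfl | rfl | rfl
    · exact Or.inl (by simp [Prod.ext_iff, sub_eq_add_neg] <;> omega)
    · exact Or.inr (Or.inl (by simp [Prod.ext_iff, sub_eq_add_neg] <;> omega))
    · exact Or.inr (Or.inr (Or.inl (by simp [Prod.ext_iff, sub_eq_add_neg] <;> omega)))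
    · exact Or.inr (Or.inr (Or.inr (by simp [Prod.ext_iff, sub_eq_add_neg] <;> omega)))

theorem pvAdj_probe {a q : Int × Int} (h : PvAdj a q) :
    a = (q.1 - 1, q.2) ∨ a = (q.1 + 1, q.2) ∨ a = (q.1, q.2 - 1) ∨ a = (q.1, q.2 + 1) := by
  rcases h with h | h | h | h <;> subst h
  · exact Or.inr (Or.inl (by simp [Prod.ext_iff, sub_eq_add_neg] <;> omega))
  · exact Or.inl (by simp [Prod.ext_iff, sub_eq_add_neg] <;> omega)
  · exact Or.inr (Or.inr (Or.inr (by simp [Prod.ext_iff, sub_eq_add_neg] <;> omega)))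
  · exact Or.inr (Or.inr (Or.inl (by simp [Prod.ext_iff, sub_eq_add_neg] <;> omega)))

-- grid get/set (Nat level)
theorem getD_set_self_row (v : List (List Bool)) (a : Nat) (row : List Bool)
    (ha : a < v.length) : (v.set a row).getD a [] = row := by
  rw [List.getD_eq_getElem?_getD, List.getElem?_set_self ha, Option.getD_some]

theorem getD_set_ne_row (v : List (List Bool)) (a y : Nat) (row : List Bool)
    (hy : a ≠ y) : (v.set a row).getD y [] = v.getD y [] := by
  rw [List.getD_eq_getElem?_getD, List.getElem?_set_ne hy, ← List.getD_eq_getElem?_getD]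

theorem getD_set_self_cell (l : List Bool) (b : Nat) (hb : b < l.length) :
    (l.set b true).getD b false = true := by
  rw [List.getD_eq_getElem?_getD, List.getElem?_set_self hb, Option.getD_some]

theorem getD_set_ne_cell (l : List Bool) (b x : Nat) (hx : b ≠ x) :
    (l.set b true).getD x false = l.getD x false := by
  rw [List.getD_eq_getElem?_getD, List.getElem?_set_ne hx, ← List.getD_eq_getElem?_getD]

theorem pv_getD_set (v : List (List Bool)) (a b y x : Nat)
    (ha : a < v.length) (hb : b < (v.getD a []).length) :
    ((v.set a ((v.getD a []).set b true)).getD y []).getD x false =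
      if a = y ∧ b = x then true else (v.getD y []).getD x false := by
  rcases eq_or_ne a y with rfl | hy
  · rw [getD_set_self_row v a _ ha]
    rcases eq_or_ne b x with rfl | hx
    · rw [getD_set_self_cell _ _ hb, if_pos ⟨rfl, rfl⟩]
    · rw [getD_set_ne_cell _ _ _ hx, if_neg (fun hh => hx hh.2)]
  · rw [getD_set_ne_row v a y _ hy, if_neg (fun hh => hy hh.1)]

theorem pvShape_set {maze : List (List Int)} {v : List (List Bool)}
    (hs : PvShape maze v) {p : Int × Int} (hp : PvIn maze p) :
    PvShape maze (pvVSet v p.1 p.2) := by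
  obtain ⟨hp1, hp2, hp3, hp4⟩ := hp
  have hlen := hs.1
  have ha : p.1.toNat < v.length := by omega
  constructor
  · simp [pvVSet, hs.1]
  · intro i
    unfold pvVSet
    rcases eq_or_ne p.1.toNat i with rfl | hne
    · rw [List.getD_eq_getElem?_getD, List.getElem?_set_self ha, Option.getD_some,
        List.length_set]
      exact hs.2 _
    · rw [List.getD_eq_getElem?_getD, List.getElem?_set_ne hne, ← List.getD_eq_getElem?_getD]
      exact hs.2 i

-- Int-level wrapper
theorem pvVGet_pvVSet {maze : List (List Int)} {v : List (List Bool)}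
    (hs : PvShape maze v) (hr : RowsOK maze) {p q : Int × Int}
    (hp : PvIn maze p) (hq : PvIn maze q) :
    pvVGet (pvVSet v p.1 p.2) q.1 q.2 = if p = q then true else pvVGet v q.1 q.2 := by
  obtain ⟨hp1, hp2, hp3, hp4⟩ := hp
  obtain ⟨hq1, hq2, hq3, hq4⟩ := hq
  have hlen := hs.1
  have ha : p.1.toNat < v.length := by omega
  have hrow : (maze.headD []).length ≤ (maze.getD p.1.toNat []).length := by
    apply hr
    rw [List.getD_eq_getElem _ _ (by omega : p.1.toNat < maze.length)]
    exact List.getElem_mem _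
  have hb : p.2.toNat < (v.getD p.1.toNat []).length := by rw [hs.2]; omega
  unfold pvVGet pvVSet
  rw [pv_getD_set v _ _ _ _ ha hb]
  by_cases hpq : p = q
  · subst hpq; rw [if_pos ⟨rfl, rfl⟩, if_pos rfl]
  · rw [if_neg, if_neg hpq]
    rintro ⟨h1, h2⟩
    exact hpq (Prod.ext_iff.mpr ⟨by omega, by omega⟩)

theorem getD_false_of_all {l : List Bool} {x : Nat} (h : ∀ b ∈ l, b = false) :
    l.getD x false = false := by
  rw [List.getD_eq_getElem?_getD]
  cases hx : l[x]? with
  | none => rfl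
  | some b => simpa using h b (List.mem_of_getElem? hx)

theorem blank_row_all_false (maze : List (List Int)) (i : Nat) :
    ∀ b ∈ ((maze.map (fun row => row.map (fun _ => false))).getD i []), b = false := by
  intro b hb
  rw [List.getD_eq_getElem?_getD, List.getElem?_map] at hb
  cases hm : maze[i]? with
  | none => rw [hm] at hb; simp at hb
  | some row =>
    rw [hm] at hb
    simp only [Option.map_some, Option.getD_some] at hb
    obtain ⟨_, _, hbf⟩ := List.mem_map.mp hb
    exact hbf.symm

theorem pvVGet_blank {maze : List (List Int)} (q : Int × Int) :
    pvVGet (maze.map (fun row => row.map (fun _ => false))) q.1 q.2 = false := by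
  unfold pvVGet
  exact getD_false_of_all (blank_row_all_false maze q.1.toNat)

theorem pvShape_blank (maze : List (List Int)) :
    PvShape maze (maze.map (fun row => row.map (fun _ => false))) := by
  constructor
  · simp
  · intro i
    rw [List.getD_eq_getElem?_getD, List.getD_eq_getElem?_getD, List.getElem?_map]
    cases hm : maze[i]? with
    | none => simp
    | some row => simp

-- unvisited-cell count (DFS progress measure)
def pvMu (maze : List (List Int)) (v : List (List Bool)) : Nat :=
  ∑ y ∈ Finset.range maze.length, ∑ x ∈ Finset.range (maze.headD []).length,
    (if pvVGet v (y : Int) (x : Int) then 0 else 1)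

theorem pvMu_le (maze : List (List Int)) (v : List (List Bool)) :
    pvMu maze v ≤ maze.length * (maze.headD []).length := by
  unfold pvMu
  have hin : ∀ y ∈ Finset.range maze.length,
      (∑ x ∈ Finset.range (maze.headD []).length,
        (if pvVGet v (y : Int) (x : Int) then 0 else 1)) ≤ (maze.headD []).length := by
    intro y _
    calc ∑ x ∈ Finset.range (maze.headD []).length,
          (if pvVGet v (y : Int) (x : Int) then 0 else 1)
        ≤ ∑ _x ∈ Finset.range (maze.headD []).length, 1 :=
          Finset.sum_le_sum (fun x _ => by split_ifs <;> omega)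
      _ = (maze.headD []).length := by simp
  calc ∑ y ∈ Finset.range maze.length, ∑ x ∈ Finset.range (maze.headD []).length,
        (if pvVGet v (y : Int) (x : Int) then 0 else 1)
      ≤ ∑ _y ∈ Finset.range maze.length, (maze.headD []).length := Finset.sum_le_sum hin
    _ = maze.length * (maze.headD []).length := by simp [Finset.sum_const, smul_eq_mul]

theorem pvMu_set {maze : List (List Int)} {v : List (List Bool)}
    (hs : PvShape maze v) (hr : RowsOK maze) {p : Int × Int} (hp : PvIn maze p)
    (hf : pvVGet v p.1 p.2 = false) :
    pvMu maze (pvVSet v p.1 p.2) + 1 = pvMu maze v := by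
  have hp1 := hp.1
  have hp2 := hp.2.1
  have hp3 := hp.2.2.1
  have hp4 := hp.2.2.2
  have hca : ((p.1.toNat : Nat) : Int) = p.1 := Int.toNat_of_nonneg hp1
  have hcb : ((p.2.toNat : Nat) : Int) = p.2 := Int.toNat_of_nonneg hp3
  have hya : p.1.toNat ∈ Finset.range maze.length := by rw [Finset.mem_range]; omega
  have hxb : p.2.toNat ∈ Finset.range (maze.headD []).length := by rw [Finset.mem_range]; omega
  have hget : ∀ q : Int × Int, PvIn maze q →
      pvVGet (pvVSet v p.1 p.2) q.1 q.2 = if p = q then true else pvVGet v q.1 q.2 :=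
    fun q hq => pvVGet_pvVSet hs hr hp hq
  have hget2 : ∀ (a b : Int), PvIn maze (a, b) →
      pvVGet (pvVSet v p.1 p.2) a b = if p = (a, b) then true else pvVGet v a b :=
    fun a b hq => pvVGet_pvVSet hs hr hp hq
  unfold pvMu
  rw [← Finset.add_sum_erase _ _ hya, ← Finset.add_sum_erase _ _ hya]
  have hrest : (∑ y ∈ (Finset.range maze.length).erase p.1.toNat,
        ∑ x ∈ Finset.range (maze.headD []).length,
          (if pvVGet (pvVSet v p.1 p.2) (y : Int) (x : Int) then 0 else 1))
      = ∑ y ∈ (Finset.range maze.length).erase p.1.toNat,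
        ∑ x ∈ Finset.range (maze.headD []).length,
          (if pvVGet v (y : Int) (x : Int) then 0 else 1) := by
    refine Finset.sum_congr rfl (fun y hy => Finset.sum_congr rfl (fun x hx => ?_))
    have hy' := Finset.mem_erase.mp hy
    have hy2 := Finset.mem_range.mp hy'.2
    have hx' := Finset.mem_range.mp hx
    have hq : PvIn maze ((y : Int), (x : Int)) :=
      ⟨by omega, by omega, by omega, by omega⟩
    have hne : ¬ p = ((y : Int), (x : Int)) := by
      intro hpe
      apply hy'.1
      have : p.1 = (y : Int) := by rw [hpe]
      omega
    rw [hget2 _ _ hq, if_neg hne]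
  rw [← Finset.add_sum_erase _ _ hxb, ← Finset.add_sum_erase _ _ hxb]
  have hinner : (∑ x ∈ (Finset.range (maze.headD []).length).erase p.2.toNat,
        (if pvVGet (pvVSet v p.1 p.2) ((p.1.toNat : Nat) : Int) ((x : Nat) : Int) then 0 else 1))
      = ∑ x ∈ (Finset.range (maze.headD []).length).erase p.2.toNat,
        (if pvVGet v ((p.1.toNat : Nat) : Int) ((x : Nat) : Int) then 0 else 1) := by
    refine Finset.sum_congr rfl (fun x hx => ?_)
    have hx' := Finset.mem_erase.mp hx
    have hx2 := Finset.mem_range.mp hx'.2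
    have hq : PvIn maze (((p.1.toNat : Nat) : Int), ((x : Nat) : Int)) :=
      ⟨by omega, by omega, by omega, by omega⟩
    have hne : ¬ p = (((p.1.toNat : Nat) : Int), ((x : Nat) : Int)) := by
      intro hpe
      apply hx'.1
      have : p.2 = (x : Int) := by rw [hpe]
      omega
    rw [hget2 _ _ hq, if_neg hne]
  have h1 : pvVGet (pvVSet v p.1 p.2) ((p.1.toNat : Nat) : Int) ((p.2.toNat : Nat) : Int) = true := by
    rw [hca, hcb, hget p hp, if_pos rfl]
  have h0 : pvVGet v ((p.1.toNat : Nat) : Int) ((p.2.toNat : Nat) : Int) = false := by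
    rw [hca, hcb]; exact hf
  have hif1 : (if pvVGet (pvVSet v p.1 p.2) ((p.1.toNat : Nat) : Int) ((p.2.toNat : Nat) : Int) = true then 0 else 1) = (0 : Nat) := by
    rw [h1]; decide
  have hif0 : (if pvVGet v ((p.1.toNat : Nat) : Int) ((p.2.toNat : Nat) : Int) = true then 0 else 1) = (1 : Nat) := by
    rw [h0]; decide
  rw [hrest, hinner, hif1, hif0]
  omega

-- DFS state invariant
def PvSInv (maze : List (List Int)) (s : Int × Int) (v : List (List Bool))
    (stack : List (Int × Int)) : Prop :=
  PvShape maze v ∧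
  (∀ p ∈ stack, PvIn maze p ∧ pvVGet v p.1 p.2 = true) ∧
  (∀ p : Int × Int, PvIn maze p → pvVGet v p.1 p.2 = true →
    pvCell maze p.1 p.2 = 2 ∧ PvReach maze s p)

set_option maxHeartbeats 1000000 in
theorem pvStep_spec {maze : List (List Int)} {s c : Int × Int} (hr : RowsOK maze)
    (hreach : PvReach maze s c) (d : Int × Int) (hd : d ∈ pvDirs)
    (v : List (List Bool)) (stack : List (Int × Int)) (hI : PvSInv maze s v stack) :
    PvSInv maze s (pvStep maze maze.length (maze.headD []).length c (v, stack) d).1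
      (pvStep maze maze.length (maze.headD []).length c (v, stack) d).2 ∧
    (∀ q : Int × Int, PvIn maze q → pvVGet v q.1 q.2 = true →
      pvVGet (pvStep maze maze.length (maze.headD []).length c (v, stack) d).1 q.1 q.2 = true) ∧
    (∀ q : Int × Int, PvIn maze q →
      pvVGet (pvStep maze maze.length (maze.headD []).length c (v, stack) d).1 q.1 q.2 = true →
      pvVGet v q.1 q.2 = true ∨ q ∈ (pvStep maze maze.length (maze.headD []).length c (v, stack) d).2) ∧
    (∀ q ∈ stack, q ∈ (pvStep maze maze.length (maze.headD []).length c (v, stack) d).2) ∧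
    (PvP maze (c.1 + d.1, c.2 + d.2) →
      pvVGet (pvStep maze maze.length (maze.headD []).length c (v, stack) d).1 (c.1 + d.1) (c.2 + d.2) = true) ∧
    (pvStep maze maze.length (maze.headD []).length c (v, stack) d).2.length +
        2 * pvMu maze (pvStep maze maze.length (maze.headD []).length c (v, stack) d).1 ≤
      stack.length + 2 * pvMu maze v := by
  obtain ⟨hsh, hstk, hvis⟩ := hI
  by_cases hcond : 0 ≤ c.1 + d.1 ∧ c.1 + d.1 < (maze.length : Int) ∧ 0 ≤ c.2 + d.2 ∧
      c.2 + d.2 < ((maze.headD []).length : Int) ∧ pvCell maze (c.1 + d.1) (c.2 + d.2) = 2 ∧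
      pvVGet v (c.1 + d.1) (c.2 + d.2) = false
  · have hstep : pvStep maze maze.length (maze.headD []).length c (v, stack) d =
        (pvVSet v (c.1 + d.1) (c.2 + d.2), ((c.1 + d.1), (c.2 + d.2)) :: stack) := by
      simp only [pvStep]
      rw [if_pos hcond]
    obtain ⟨hb1, hb2, hb3, hb4, hcell, hfalse⟩ := hcond
    have hn : PvIn maze (c.1 + d.1, c.2 + d.2) := ⟨hb1, hb2, hb3, hb4⟩
    have hgetn : ∀ q : Int × Int, PvIn maze q →
        pvVGet (pvVSet v (c.1 + d.1) (c.2 + d.2)) q.1 q.2 =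
          if (c.1 + d.1, c.2 + d.2) = q then true else pvVGet v q.1 q.2 := by
      intro q hq
      exact pvVGet_pvVSet hsh hr hn hq
    have hgetself : pvVGet (pvVSet v (c.1 + d.1) (c.2 + d.2)) (c.1 + d.1) (c.2 + d.2) = true := by
      have := pvVGet_pvVSet hsh hr hn hn
      simpa using this
    have hmono : ∀ q : Int × Int, PvIn maze q → pvVGet v q.1 q.2 = true →
        pvVGet (pvVSet v (c.1 + d.1) (c.2 + d.2)) q.1 q.2 = true := by
      intro q hq hvq
      rw [hgetn q hq]
      split_ifs <;> simp [hvq]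
    have hnreach : PvReach maze s (c.1 + d.1, c.2 + d.2) :=
      PvReach.step hreach ⟨hn, hcell⟩ (pvAdj_nbr.mpr ⟨d, hd, rfl⟩)
    rw [hstep]
    refine ⟨⟨pvShape_set hsh hn, ?_, ?_⟩, hmono, ?_, ?_, ?_, ?_⟩
    · intro p hp
      rcases List.mem_cons.mp hp with rfl | hp'
      · exact ⟨hn, hgetself⟩
      · obtain ⟨hin, hvg⟩ := hstk p hp'
        exact ⟨hin, hmono p hin hvg⟩
    · intro p hin hvg
      rw [hgetn p hin] at hvg
      by_cases hpq : (c.1 + d.1, c.2 + d.2) = p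
      · subst hpq; exact ⟨hcell, hnreach⟩
      · rw [if_neg hpq] at hvg
        exact hvis p hin hvg
    · intro q hin hvg
      rw [hgetn q hin] at hvg
      by_cases hpq : (c.1 + d.1, c.2 + d.2) = q
      · exact Or.inr (List.mem_cons.mpr (Or.inl hpq.symm))
      · rw [if_neg hpq] at hvg
        exact Or.inl hvg
    · exact fun q hq => List.mem_cons_of_mem _ hq
    · intro _
      exact hgetself
    · have hmu : pvMu maze (pvVSet v (c.1 + d.1) (c.2 + d.2)) + 1 = pvMu maze v :=
        pvMu_set (p := (c.1 + d.1, c.2 + d.2)) hsh hr hn hfalse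
      simp only [List.length_cons]
      omega
  · have hstep : pvStep maze maze.length (maze.headD []).length c (v, stack) d = (v, stack) := by
      simp only [pvStep]
      rw [if_neg hcond]
    rw [hstep]
    refine ⟨⟨hsh, hstk, hvis⟩, fun q _ h => h, fun q _ h => Or.inl h, fun q h => h, ?_, le_refl _⟩
    intro hP
    obtain ⟨⟨h1, h2, h3, h4⟩, hcell⟩ := hP
    cases hvg : pvVGet v (c.1 + d.1) (c.2 + d.2) with
    | false => exact absurd ⟨h1, h2, h3, h4, hcell, hvg⟩ hcond
    | true => rfl

theorem pvFold_spec {maze : List (List Int)} {s c : Int × Int} (hr : RowsOK maze)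
    (hreach : PvReach maze s c) :
    ∀ (ds : List (Int × Int)), (∀ d ∈ ds, d ∈ pvDirs) →
    ∀ (v : List (List Bool)) (stack : List (Int × Int)), PvSInv maze s v stack →
    PvSInv maze s (ds.foldl (pvStep maze maze.length (maze.headD []).length c) (v, stack)).1
      (ds.foldl (pvStep maze maze.length (maze.headD []).length c) (v, stack)).2 ∧
    (∀ q : Int × Int, PvIn maze q → pvVGet v q.1 q.2 = true →
      pvVGet (ds.foldl (pvStep maze maze.length (maze.headD []).length c) (v, stack)).1 q.1 q.2 = true) ∧
    (∀ q : Int × Int, PvIn maze q →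
      pvVGet (ds.foldl (pvStep maze maze.length (maze.headD []).length c) (v, stack)).1 q.1 q.2 = true →
      pvVGet v q.1 q.2 = true ∨ q ∈ (ds.foldl (pvStep maze maze.length (maze.headD []).length c) (v, stack)).2) ∧
    (∀ q ∈ stack, q ∈ (ds.foldl (pvStep maze maze.length (maze.headD []).length c) (v, stack)).2) ∧
    (∀ d ∈ ds, PvP maze (c.1 + d.1, c.2 + d.2) →
      pvVGet (ds.foldl (pvStep maze maze.length (maze.headD []).length c) (v, stack)).1 (c.1 + d.1) (c.2 + d.2) = true) ∧
    (ds.foldl (pvStep maze maze.length (maze.headD []).length c) (v, stack)).2.length +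
        2 * pvMu maze (ds.foldl (pvStep maze maze.length (maze.headD []).length c) (v, stack)).1 ≤
      stack.length + 2 * pvMu maze v := by
  intro ds
  induction ds with
  | nil =>
    intro _ v stack hI
    exact ⟨hI, fun q _ h => h, fun q _ h => Or.inl h, fun q h => h, fun d hd => absurd hd (List.not_mem_nil), le_refl _⟩
  | cons d ds ih =>
    intro hds v stack hI
    have hd : d ∈ pvDirs := hds d List.mem_cons_self
    obtain ⟨hI1, hmono1, hnew1, hsub1, hprobe1, hmu1⟩ :=
      pvStep_spec hr hreach d hd v stack hI
    have hfold : (d :: ds).foldl (pvStep maze maze.length (maze.headD []).length c) (v, stack) =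
        ds.foldl (pvStep maze maze.length (maze.headD []).length c)
          ((pvStep maze maze.length (maze.headD []).length c (v, stack) d).1,
           (pvStep maze maze.length (maze.headD []).length c (v, stack) d).2) := by
      rw [List.foldl_cons]
    obtain ⟨hI2, hmono2, hnew2, hsub2, hprobe2, hmu2⟩ :=
      ih (fun d' hd' => hds d' (List.mem_cons_of_mem _ hd')) _ _ hI1
    rw [hfold]
    refine ⟨hI2, ?_, ?_, ?_, ?_, ?_⟩
    · intro q hq hvq
      exact hmono2 q hq (hmono1 q hq hvq)
    · intro q hq hvq
      rcases hnew2 q hq hvq with h | h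
      · rcases hnew1 q hq h with h' | h'
        · exact Or.inl h'
        · exact Or.inr (hsub2 q h')
      · exact Or.inr h
    · intro q hq
      exact hsub2 q (hsub1 q hq)
    · intro d' hd' hP
      rcases List.mem_cons.mp hd' with rfl | hd''
      · exact hmono2 _ hP.1 (hprobe1 hP)
      · exact hprobe2 d' hd'' hP
    · omega

theorem pvDfs_spec {maze : List (List Int)} {s : Int × Int} (hr : RowsOK maze) :
    ∀ (fuel : Nat) (v : List (List Bool)) (stack : List (Int × Int)),
    PvSInv maze s v stack →
    (∀ p : Int × Int, PvIn maze p → pvVGet v p.1 p.2 = true →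
      p ∈ stack ∨ ∀ q : Int × Int, PvP maze q → PvAdj p q → pvVGet v q.1 q.2 = true) →
    stack.length + 2 * pvMu maze v ≤ fuel →
    (∀ p : Int × Int, PvIn maze p → pvVGet v p.1 p.2 = true →
      pvVGet (pvDfs maze maze.length (maze.headD []).length fuel v stack) p.1 p.2 = true) ∧
    (∀ p : Int × Int, PvIn maze p →
      pvVGet (pvDfs maze maze.length (maze.headD []).length fuel v stack) p.1 p.2 = true →
      pvCell maze p.1 p.2 = 2 ∧ PvReach maze s p) ∧
    (∀ p : Int × Int, PvIn maze p →
      pvVGet (pvDfs maze maze.length (maze.headD []).length fuel v stack) p.1 p.2 = true →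
      ∀ q : Int × Int, PvP maze q → PvAdj p q →
        pvVGet (pvDfs maze maze.length (maze.headD []).length fuel v stack) q.1 q.2 = true) := by
  intro fuel
  induction fuel with
  | zero =>
    intro v stack hI hCl hmu
    cases stack with
    | nil =>
      rw [show pvDfs maze maze.length (maze.headD []).length 0 v [] = v from rfl]
      refine ⟨fun p _ h => h, fun p hp h => hI.2.2 p hp h, ?_⟩
      intro p hp hv q hq hadj
      rcases hCl p hp hv with h | h
      · cases h
      · exact h q hq hadj
    | cons c rest => simp only [List.length_cons] at hmu; omega
  | succ fuel ih =>
    intro v stack hI hCl hmu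
    cases stack with
    | nil =>
      rw [show pvDfs maze maze.length (maze.headD []).length (fuel + 1) v [] = v from rfl]
      refine ⟨fun p _ h => h, fun p hp h => hI.2.2 p hp h, ?_⟩
      intro p hp hv q hq hadj
      rcases hCl p hp hv with h | h
      · cases h
      · exact h q hq hadj
    | cons c rest =>
      have hc := hI.2.1 c List.mem_cons_self
      have hcreach : PvReach maze s c := (hI.2.2 c hc.1 hc.2).2
      have hIrest : PvSInv maze s v rest :=
        ⟨hI.1, fun p hp => hI.2.1 p (List.mem_cons_of_mem _ hp), hI.2.2⟩
      obtain ⟨hF1, hFmono, hFnew, hFsub, hFprobe, hFmu⟩ :=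
        pvFold_spec hr hcreach pvDirs (fun d hd => hd) v rest hIrest
      have hdfs : pvDfs maze maze.length (maze.headD []).length (fuel + 1) v (c :: rest) =
          pvDfs maze maze.length (maze.headD []).length fuel
            (pvDirs.foldl (pvStep maze maze.length (maze.headD []).length c) (v, rest)).1
            (pvDirs.foldl (pvStep maze maze.length (maze.headD []).length c) (v, rest)).2 := rfl
      have hCl' : ∀ p : Int × Int, PvIn maze p →
          pvVGet (pvDirs.foldl (pvStep maze maze.length (maze.headD []).length c) (v, rest)).1 p.1 p.2 = true →
          p ∈ (pvDirs.foldl (pvStep maze maze.length (maze.headD []).length c) (v, rest)).2 ∨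
          ∀ q : Int × Int, PvP maze q → PvAdj p q →
            pvVGet (pvDirs.foldl (pvStep maze maze.length (maze.headD []).length c) (v, rest)).1 q.1 q.2 = true := by
        intro p hp hv'
        rcases hFnew p hp hv' with hold | hnew
        · rcases hCl p hp hold with hmem | hclosed
          · rcases List.mem_cons.mp hmem with rfl | hmem'
            · right
              intro q hq hadj
              obtain ⟨d, hd, rfl⟩ := pvAdj_nbr.mp hadj
              exact hFprobe d hd hq
            · exact Or.inl (hFsub p hmem')
          · right
            intro q hq hadj
            exact hFmono q hq.1 (hclosed q hq hadj)
        · exact Or.inl hnew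
      have hmu' : (pvDirs.foldl (pvStep maze maze.length (maze.headD []).length c) (v, rest)).2.length +
          2 * pvMu maze (pvDirs.foldl (pvStep maze maze.length (maze.headD []).length c) (v, rest)).1 ≤ fuel := by
        simp only [List.length_cons] at hmu
        omega
      obtain ⟨hG1, hG2, hG3⟩ := ih _ _ hF1 hCl' hmu'
      rw [hdfs]
      exact ⟨fun p hp hv' => hG1 p hp (hFmono p hp hv'), hG2, hG3⟩

-- A's start is a path cell
theorem pvFindStart_pvP {maze : List (List Int)} {s : Int × Int}
    (h : pvFindStart maze maze.length (maze.headD []).length = some s) : PvP maze s := by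
  unfold pvFindStart at h
  obtain ⟨y, hy, hfy⟩ := List.exists_of_findSome?_eq_some h
  obtain ⟨x, hfind, hsfx⟩ := Option.map_eq_some_iff.mp hfy
  have hxm := List.mem_of_find?_eq_some hfind
  have hcell := List.find?_some hfind
  rw [List.mem_range] at hy hxm
  have hsfx' : ((y : Int), (x : Int)) = s := hsfx
  clear hsfx hfy h
  subst hsfx'
  refine ⟨⟨?_, ?_, ?_, ?_⟩, ?_⟩
  · show (0 : Int) ≤ (y : Int); omega
  · show ((y : Nat) : Int) < (maze.length : Int); omega
  · show (0 : Int) ≤ (x : Int); omega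
  · show ((x : Nat) : Int) < ((maze.headD []).length : Int); omega
  · show pvCell maze ((y : Nat) : Int) ((x : Nat) : Int) = 2
    simpa using hcell

theorem pvA_all_iff (maze : List (List Int)) (v : List (List Bool)) :
    ((List.range maze.length).all (fun y => (List.range (maze.headD []).length).all (fun x =>
      !(pvCell maze (y : Int) (x : Int) == 2) || pvVGet v (y : Int) (x : Int))) = true) ↔
    (∀ p : Int × Int, PvP maze p → pvVGet v p.1 p.2 = true) := by
  simp only [List.all_eq_true, List.mem_range]
  constructor
  · intro hall p hPp
    obtain ⟨⟨h1, h2, h3, h4⟩, hcell⟩ := hPp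
    have hb := hall p.1.toNat (by omega) p.2.toNat (by omega)
    rw [Int.toNat_of_nonneg h1, Int.toNat_of_nonneg h3] at hb
    rw [Bool.or_eq_true] at hb
    rcases hb with hb | hb
    · rw [Bool.not_eq_true', beq_eq_false_iff_ne] at hb
      exact absurd hcell hb
    · exact hb
  · intro hall y hy x hx
    rw [Bool.or_eq_true]
    by_cases hcell : pvCell maze (y : Int) (x : Int) = 2
    · exact Or.inr (hall ((y : Int), (x : Int)) ⟨⟨by omega, by omega, by omega, by omega⟩, hcell⟩)
    · exact Or.inl (by simp [hcell])

theorem pvA_core {maze : List (List Int)} {s : Int × Int} (hr : RowsOK maze) (hPs : PvP maze s)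
    (fuel : Nat)
    (hfuel : 1 + 2 * pvMu maze (pvVSet (maze.map (fun row => row.map (fun _ => false))) s.1 s.2) ≤ fuel) :
    ((∀ p : Int × Int, PvP maze p → pvVGet (pvDfs maze maze.length (maze.headD []).length fuel
        (pvVSet (maze.map (fun row => row.map (fun _ => false))) s.1 s.2) [s]) p.1 p.2 = true) ↔
      (∀ p : Int × Int, PvP maze p → PvReach maze s p)) := by
  have hsin : PvIn maze s := hPs.1
  have hget0 : ∀ q : Int × Int, PvIn maze q →
      pvVGet (pvVSet (maze.map (fun row => row.map (fun _ => false))) s.1 s.2) q.1 q.2 =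
        if s = q then true else false := by
    intro q hq
    rw [pvVGet_pvVSet (pvShape_blank maze) hr hsin hq]
    by_cases h : s = q
    · rw [if_pos h, if_pos h]
    · rw [if_neg h, if_neg h]
      exact pvVGet_blank q
  have hInv0 : PvSInv maze s (pvVSet (maze.map (fun row => row.map (fun _ => false))) s.1 s.2) [s] := by
    refine ⟨pvShape_set (pvShape_blank maze) hsin, ?_, ?_⟩
    · intro p hp
      rcases List.mem_cons.mp hp with rfl | h
      · exact ⟨hsin, by rw [hget0 p hsin, if_pos rfl]⟩
      · cases h
    · intro p hp hv
      rw [hget0 p hp] at hv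
      by_cases hsp : s = p
      · subst hsp; exact ⟨hPs.2, PvReach.base⟩
      · rw [if_neg hsp] at hv; cases hv
  have hCl0 : ∀ p : Int × Int, PvIn maze p →
      pvVGet (pvVSet (maze.map (fun row => row.map (fun _ => false))) s.1 s.2) p.1 p.2 = true →
      p ∈ [s] ∨ ∀ q : Int × Int, PvP maze q → PvAdj p q →
        pvVGet (pvVSet (maze.map (fun row => row.map (fun _ => false))) s.1 s.2) q.1 q.2 = true := by
    intro p hp hv
    rw [hget0 p hp] at hv
    by_cases hsp : s = p
    · subst hsp; exact Or.inl List.mem_cons_self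
    · rw [if_neg hsp] at hv; cases hv
  obtain ⟨hmono, hvisP, hclosed⟩ := pvDfs_spec hr fuel
    (pvVSet (maze.map (fun row => row.map (fun _ => false))) s.1 s.2) [s] hInv0 hCl0
    (by simp only [List.length_cons, List.length_nil]; omega)
  have hsvis := hmono s hsin (by rw [hget0 s hsin, if_pos rfl])
  have hreach_vis : ∀ p : Int × Int, PvReach maze s p →
      pvVGet (pvDfs maze maze.length (maze.headD []).length fuel
        (pvVSet (maze.map (fun row => row.map (fun _ => false))) s.1 s.2) [s]) p.1 p.2 = true := by
    intro p hp
    induction hp with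
    | base => exact hsvis
    | step hp' hq hadj ih => exact hclosed _ (pvReach_pvP hPs hp').1 ih _ hq hadj
  constructor
  · intro hall p hPp
    exact (hvisP p hPp.1 (hall p hPp)).2
  · intro hall p hPp
    exact hreach_vis p (hall p hPp)

-- characterisation of A
theorem pvA_iff {maze : List (List Int)} {s : Int × Int} (hr : RowsOK maze)
    (hfind : pvFindStart maze maze.length (maze.headD []).length = some s) :
    (is_fully_connected maze = true ↔ ∀ p : Int × Int, PvP maze p → PvReach maze s p) := by
  have hPs : PvP maze s := pvFindStart_pvP hfind
  simp only [is_fully_connected, hfind]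
  rw [pvA_all_iff]
  apply pvA_core hr hPs
  have := pvMu_le maze (pvVSet (maze.map (fun row => row.map (fun _ => false))) s.1 s.2)
  have key : 2 * maze.length * (maze.headD []).length =
      2 * (maze.length * (maze.headD []).length) := by ring
  omega

-- B-side facts
theorem mem_pvPath {maze : List (List Int)} {p : Int × Int} :
    p ∈ pvPath maze maze.length (maze.headD []).length ↔ PvP maze p := by
  unfold pvPath
  simp only [List.mem_flatMap, List.mem_filterMap, List.mem_range]
  constructor
  · rintro ⟨y, hy, x, hx, hsome⟩
    split_ifs at hsome with hcell
    injection hsome with h'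
    subst h'
    refine ⟨⟨?_, ?_, ?_, ?_⟩, ?_⟩
    · show (0 : Int) ≤ (y : Int); omega
    · show ((y : Nat) : Int) < (maze.length : Int); omega
    · show (0 : Int) ≤ (x : Int); omega
    · show ((x : Nat) : Int) < ((maze.headD []).length : Int); omega
    · show pvCell maze ((y : Nat) : Int) ((x : Nat) : Int) = 2
      simpa using hcell
  · rintro ⟨⟨h1, h2, h3, h4⟩, hcell⟩
    refine ⟨p.1.toNat, by omega, p.2.toNat, by omega, ?_⟩
    rw [if_pos]
    · rw [Int.toNat_of_nonneg h1, Int.toNat_of_nonneg h3, Prod.mk.eta]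
    · rw [Int.toNat_of_nonneg h1, Int.toNat_of_nonneg h3, beq_iff_eq]
      exact hcell

theorem fst_of_mem_inner {maze : List (List Int)} {y : Nat} {a : Int × Int}
    (h : a ∈ (List.range (maze.headD []).length).filterMap (fun (x : Nat) =>
      if pvCell maze (y : Int) (x : Int) == 2 then some ((y : Int), (x : Int)) else none)) :
    a.1 = (y : Int) := by
  rw [List.mem_filterMap] at h
  obtain ⟨x, _, hsome⟩ := h
  split_ifs at hsome
  injection hsome with h'
  rw [← h']

theorem nodup_inner (maze : List (List Int)) (y : Nat) :
    ((List.range (maze.headD []).length).filterMap (fun (x : Nat) =>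
      if pvCell maze (y : Int) (x : Int) == 2 then some ((y : Int), (x : Int)) else none)).Nodup := by
  apply List.Nodup.filterMap ?_ (List.nodup_range)
  intro a a' b hb hb'
  by_cases h1 : (pvCell maze (y : Int) ((a : Nat) : Int) == 2) = true <;>
    by_cases h2 : (pvCell maze (y : Int) ((a' : Nat) : Int) == 2) = true <;>
    simp [h1, h2, Prod.ext_iff] at hb hb' <;> omega

theorem nodup_pvPath (maze : List (List Int)) :
    (pvPath maze maze.length (maze.headD []).length).Nodup := by
  unfold pvPath
  have key : ∀ (ys : List Nat), ys.Nodup →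
      (ys.flatMap (fun (y : Nat) => (List.range (maze.headD []).length).filterMap (fun (x : Nat) =>
        if pvCell maze (y : Int) (x : Int) == 2 then some ((y : Int), (x : Int)) else none))).Nodup := by
    intro ys
    induction ys with
    | nil => intro _; simp
    | cons y ys ih =>
      intro hnd
      rw [List.flatMap_cons, List.nodup_append]
      refine ⟨nodup_inner maze y, ih (List.Nodup.of_cons hnd), ?_⟩
      intro a ha b hb
      rw [List.mem_flatMap] at hb
      obtain ⟨y', hy', hmem'⟩ := hb
      intro heq
      subst heq
      have e1 : a.1 = (y : Int) := fst_of_mem_inner ha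
      have e2 : a.1 = (y' : Int) := fst_of_mem_inner hmem'
      have : y = y' := by omega
      subst this
      exact (List.nodup_cons.mp hnd).1 hy'
  exact key (List.range maze.length) List.nodup_range

theorem sub_nodup_len {r l : List (Int × Int)} (h : r.Nodup) (hs : ∀ p ∈ r, p ∈ l) :
    r.length ≤ l.length := by
  have h1 : r.toFinset.card = r.length := List.toFinset_card_of_nodup h
  have h2 : r.toFinset ⊆ l.toFinset := by
    intro a ha
    rw [List.mem_toFinset] at ha ⊢
    exact hs a ha
  have h3 := Finset.card_le_card h2
  have h4 := l.toFinset_card_le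
  omega

def PvRInv (maze : List (List Int)) (s : Int × Int) (r : List (Int × Int)) : Prop :=
  r.Nodup ∧ ∀ p ∈ r, PvP maze p ∧ PvReach maze s p

theorem pvNbhd_adj {r : List (Int × Int)} {p : Int × Int} (h : pvNbhd r p = true) :
    ∃ a ∈ r, PvAdj a p := by
  unfold pvNbhd at h
  rw [Bool.or_eq_true, Bool.or_eq_true, Bool.or_eq_true] at h
  rcases h with ((h | h) | h) | h <;> rw [List.contains_iff_mem] at h
  · exact ⟨_, h, Or.inr (Or.inl (by simp [Prod.ext_iff] <;> omega))⟩
  · exact ⟨_, h, Or.inl (by simp [Prod.ext_iff] <;> omega)⟩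
  · exact ⟨_, h, Or.inr (Or.inr (Or.inr (by simp [Prod.ext_iff] <;> omega)))⟩
  · exact ⟨_, h, Or.inr (Or.inr (Or.inl (by simp [Prod.ext_iff] <;> omega)))⟩

theorem pvNbhd_of_adj {r : List (Int × Int)} {a p : Int × Int} (ha : a ∈ r) (h : PvAdj a p) :
    pvNbhd r p = true := by
  unfold pvNbhd
  rw [Bool.or_eq_true, Bool.or_eq_true, Bool.or_eq_true]
  rcases pvAdj_probe h with h' | h' | h' | h'
  · exact Or.inl (Or.inl (Or.inl (by rw [List.contains_iff_mem, ← h']; exact ha)))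
  · exact Or.inl (Or.inl (Or.inr (by rw [List.contains_iff_mem, ← h']; exact ha)))
  · exact Or.inl (Or.inr (by rw [List.contains_iff_mem, ← h']; exact ha))
  · exact Or.inr (by rw [List.contains_iff_mem, ← h']; exact ha)

theorem pvPass_spec {maze : List (List Int)} {s : Int × Int} :
    ∀ (l : List (Int × Int)), (∀ p ∈ l, PvP maze p) →
    ∀ (r : List (Int × Int)) (b : Bool), PvRInv maze s r →
    PvRInv maze s (l.foldl pvPassStep (r, b)).1 ∧
    (∀ p ∈ r, p ∈ (l.foldl pvPassStep (r, b)).1) ∧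
    r.length ≤ (l.foldl pvPassStep (r, b)).1.length ∧
    (b = true → (l.foldl pvPassStep (r, b)).2 = true) ∧
    ((l.foldl pvPassStep (r, b)).2 = false →
      (l.foldl pvPassStep (r, b)).1 = r ∧ ∀ p ∈ l, p ∉ r → pvNbhd r p = false) ∧
    ((l.foldl pvPassStep (r, b)).2 = true → b = true ∨ r.length < (l.foldl pvPassStep (r, b)).1.length) := by
  intro l
  induction l with
  | nil =>
    intro _ r b hInv
    exact ⟨hInv, fun p hp => hp, le_refl _, fun h => h,
      fun _ => ⟨rfl, fun p hp => absurd hp (List.not_mem_nil)⟩, fun h => Or.inl h⟩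
  | cons p l ih =>
    intro hPl r b hInv
    have hPp : PvP maze p := hPl p List.mem_cons_self
    have hPl' : ∀ q ∈ l, PvP maze q := fun q hq => hPl q (List.mem_cons_of_mem _ hq)
    rw [List.foldl_cons]
    by_cases hc : ¬ r.contains p = true ∧ pvNbhd r p = true
    · have hpnotin : p ∉ r := fun hmem => hc.1 (List.contains_iff_mem.mpr hmem)
      have hstep : pvPassStep (r, b) p = (PySem.Set.add r p, true) := by
        simp only [pvPassStep]
        rw [if_pos hc]
      have hadd : PySem.Set.add r p = r ++ [p] := by
        simp [PySem.Set.add, PySem.Set.contains, hpnotin]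
      obtain ⟨a, haR, hadj⟩ := pvNbhd_adj hc.2
      have hInv' : PvRInv maze s (r ++ [p]) := by
        constructor
        · rw [List.nodup_append]
          refine ⟨hInv.1, by simp, ?_⟩
          intro q hq q2 hq2
          rw [List.mem_singleton] at hq2
          subst hq2
          exact fun heq => hpnotin (heq ▸ hq)
        · intro q hq
          rcases List.mem_append.mp hq with hq | hq
          · exact hInv.2 q hq
          · rw [List.mem_singleton] at hq
            subst hq
            exact ⟨hPp, PvReach.step (hInv.2 a haR).2 hPp hadj⟩
      have hlen : r.length < (r ++ [p]).length := by simp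
      obtain ⟨G1, G2, G3, G4, G5, G6⟩ := ih hPl' (r ++ [p]) true hInv'
      rw [hstep, hadd]
      refine ⟨G1, ?_, ?_, ?_, ?_, ?_⟩
      · intro q hq
        exact G2 q (List.mem_append_left _ hq)
      · omega
      · intro _
        exact G4 rfl
      · intro hfalse
        exfalso
        have := G4 rfl
        rw [hfalse] at this
        cases this
      · intro _
        right
        omega
    · have hstep : pvPassStep (r, b) p = (r, b) := by
        simp only [pvPassStep]
        rw [if_neg hc]
      obtain ⟨G1, G2, G3, G4, G5, G6⟩ := ih hPl' r b hInv
      rw [hstep]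
      refine ⟨G1, G2, G3, G4, ?_, G6⟩
      intro hfalse
      obtain ⟨he, hcl⟩ := G5 hfalse
      refine ⟨he, ?_⟩
      intro q hq hqr
      rcases List.mem_cons.mp hq with rfl | hq'
      · rw [Bool.eq_false_iff]
        intro hnb
        apply hc
        exact ⟨fun hct => hqr (List.contains_iff_mem.mp hct), hnb⟩
      · exact hcl q hq' hqr

theorem pvSat_spec {maze : List (List Int)} {s : Int × Int} :
    ∀ (fuel : Nat) (r : List (Int × Int)), PvRInv maze s r →
    (pvPath maze maze.length (maze.headD []).length).length + 1 ≤ fuel + r.length →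
    PvRInv maze s (pvSat (pvPath maze maze.length (maze.headD []).length) fuel r) ∧
    (∀ p ∈ r, p ∈ pvSat (pvPath maze maze.length (maze.headD []).length) fuel r) ∧
    (∀ p ∈ pvPath maze maze.length (maze.headD []).length,
      pvNbhd (pvSat (pvPath maze maze.length (maze.headD []).length) fuel r) p = true →
      p ∈ pvSat (pvPath maze maze.length (maze.headD []).length) fuel r) := by
  intro fuel
  induction fuel with
  | zero =>
    intro r hInv hlen
    exfalso
    have hsub : ∀ p ∈ r, p ∈ pvPath maze maze.length (maze.headD []).length :=
      fun p hp => mem_pvPath.mpr (hInv.2 p hp).1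
    have := sub_nodup_len hInv.1 hsub
    omega
  | succ fuel ih =>
    intro r hInv hlen
    obtain ⟨G1, G2, G3, G4, G5, G6⟩ :=
      pvPass_spec (pvPath maze maze.length (maze.headD []).length) (fun p hp => mem_pvPath.mp hp) r false hInv
    have hsat : pvSat (pvPath maze maze.length (maze.headD []).length) (fuel + 1) r =
        if ((pvPath maze maze.length (maze.headD []).length).foldl pvPassStep (r, false)).2 then pvSat (pvPath maze maze.length (maze.headD []).length) fuel ((pvPath maze maze.length (maze.headD []).length).foldl pvPassStep (r, false)).1 else ((pvPath maze maze.length (maze.headD []).length).foldl pvPassStep (r, false)).1 := rfl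
    rw [hsat]
    by_cases hch : ((pvPath maze maze.length (maze.headD []).length).foldl pvPassStep (r, false)).2 = true
    · rw [if_pos hch]
      have hlt : r.length < ((pvPath maze maze.length (maze.headD []).length).foldl pvPassStep (r, false)).1.length := by
        rcases G6 hch with h | h
        · cases h
        · exact h
      obtain ⟨H1, H2, H3⟩ := ih ((pvPath maze maze.length (maze.headD []).length).foldl pvPassStep (r, false)).1 G1 (by omega)
      exact ⟨H1, fun p hp => H2 p (G2 p hp), H3⟩
    · rw [if_neg hch]
      have hfalse : ((pvPath maze maze.length (maze.headD []).length).foldl pvPassStep (r, false)).2 = false := by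
        rw [Bool.eq_false_iff]
        exact hch
      obtain ⟨he, hcl⟩ := G5 hfalse
      rw [he]
      refine ⟨hInv, fun p hp => hp, ?_⟩
      intro p hp hnb
      by_cases hpr : p ∈ r
      · exact hpr
      · exfalso
        have := hcl p hp hpr
        rw [this] at hnb
        cases hnb

-- characterisation of B
theorem pvB_iff {maze : List (List Int)} {s : Int × Int} {rest : List (Int × Int)}
    (hpath : pvPath maze maze.length (maze.headD []).length = s :: rest) :
    (is_fully_connected_alt maze = true ↔ ∀ p : Int × Int, PvP maze p → PvReach maze s p) := by
  have hsP : PvP maze s := mem_pvPath.mp (by rw [hpath]; exact List.mem_cons_self)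
  have hInv0 : PvRInv maze s [s] := by
    refine ⟨by simp, ?_⟩
    intro p hp
    rw [List.mem_singleton] at hp
    subst hp
    exact ⟨hsP, PvReach.base⟩
  obtain ⟨H1, H2, H3⟩ := pvSat_spec ((pvPath maze maze.length (maze.headD []).length).length + 1) [s] hInv0 (by simp)
  have hreach_mem : ∀ p : Int × Int, PvReach maze s p → p ∈ pvSat (pvPath maze maze.length (maze.headD []).length) ((pvPath maze maze.length (maze.headD []).length).length + 1) [s] := by
    intro p hp
    induction hp with
    | base => exact H2 s (List.mem_singleton.mpr rfl)
    | step hp' hq hadj ih =>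
      exact H3 _ (mem_pvPath.mpr hq) (pvNbhd_of_adj ih hadj)
  have hB : is_fully_connected_alt maze =
      ((pvSat (s :: rest) ((s :: rest).length + 1) (PySem.Set.ofList [s])).length == (s :: rest).length) := by
    simp only [is_fully_connected_alt]
    rw [hpath]
  have hofl : PySem.Set.ofList [s] = [s] := rfl
  rw [hB, hofl, ← hpath, beq_iff_eq]
  constructor
  · intro hleneq p hPp
    have hsubs : ∀ q ∈ pvSat (pvPath maze maze.length (maze.headD []).length) ((pvPath maze maze.length (maze.headD []).length).length + 1) [s], q ∈ pvPath maze maze.length (maze.headD []).length :=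
      fun q hq => mem_pvPath.mpr (H1.2 q hq).1
    have hfin : (pvSat (pvPath maze maze.length (maze.headD []).length) ((pvPath maze maze.length (maze.headD []).length).length + 1) [s]).toFinset = (pvPath maze maze.length (maze.headD []).length).toFinset := by
      apply Finset.eq_of_subset_of_card_le
      · intro a ha
        rw [List.mem_toFinset] at ha ⊢
        exact hsubs a ha
      · have e1 : (pvPath maze maze.length (maze.headD []).length).toFinset.card = (pvPath maze maze.length (maze.headD []).length).length :=
          List.toFinset_card_of_nodup (nodup_pvPath maze)
        have e2 : (pvSat (pvPath maze maze.length (maze.headD []).length) ((pvPath maze maze.length (maze.headD []).length).length + 1) [s]).toFinset.card = (pvSat (pvPath maze maze.length (maze.headD []).length) ((pvPath maze maze.length (maze.headD []).length).length + 1) [s]).length :=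
          List.toFinset_card_of_nodup H1.1
        omega
    have hmem : p ∈ pvSat (pvPath maze maze.length (maze.headD []).length) ((pvPath maze maze.length (maze.headD []).length).length + 1) [s] := by
      rw [← List.mem_toFinset, hfin, List.mem_toFinset]
      exact mem_pvPath.mpr hPp
    exact (H1.2 p hmem).2
  · intro hall
    have hsub1 : ∀ q ∈ pvSat (pvPath maze maze.length (maze.headD []).length) ((pvPath maze maze.length (maze.headD []).length).length + 1) [s], q ∈ pvPath maze maze.length (maze.headD []).length :=
      fun q hq => mem_pvPath.mpr (H1.2 q hq).1
    have hsub2 : ∀ q ∈ pvPath maze maze.length (maze.headD []).length, q ∈ pvSat (pvPath maze maze.length (maze.headD []).length) ((pvPath maze maze.length (maze.headD []).length).length + 1) [s] :=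
      fun q hq => hreach_mem q (hall q (mem_pvPath.mp hq))
    have h1 := sub_nodup_len H1.1 hsub1
    have h2 := sub_nodup_len (nodup_pvPath maze) hsub2
    omega

-- the two first-path-cell searches find the same cell
theorem find?_map_eq_head?_filterMap {α β : Type} (l : List α) (p : α → Bool) (f : α → β) :
    (l.find? p).map f = (l.filterMap (fun x => if p x then some (f x) else none)).head? := by
  induction l with
  | nil => rfl
  | cons x xs ih =>
    by_cases hx : p x = true
    · simp [List.find?_cons, List.filterMap_cons, hx]
    · have hx' : p x = false := by
        rw [Bool.eq_false_iff]
        exact hx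
      simp [List.find?_cons, List.filterMap_cons, hx', ih]

theorem findSome?_head?_flatMap {α β : Type} (l : List α) (g : α → List β) :
    (l.findSome? (fun a => (g a).head?)) = (l.flatMap g).head? := by
  induction l with
  | nil => rfl
  | cons x xs ih =>
    cases hgx : (g x).head? <;>
      simp [List.findSome?_cons, List.flatMap_cons, List.head?_append, hgx, ih]

theorem pvFindStart_eq_head {maze : List (List Int)} :
    pvFindStart maze maze.length (maze.headD []).length =
      (pvPath maze maze.length (maze.headD []).length).head? := by
  unfold pvFindStart pvPath
  have hfun : (fun (y : Nat) => (((List.range (maze.headD []).length).find?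
        (fun (x : Nat) => pvCell maze (y : Int) (x : Int) == 2)).map
          (fun (x : Nat) => ((y : Int), (x : Int))))) =
      (fun (y : Nat) => ((List.range (maze.headD []).length).filterMap
        (fun (x : Nat) => if pvCell maze (y : Int) (x : Int) == 2 then
          some ((y : Int), (x : Int)) else none)).head?) :=
    funext (fun y => find?_map_eq_head?_filterMap _ _ _)
  rw [hfun]
  exact findSome?_head?_flatMap _ _

-- ===== VERDICT (by name: the statement is the Claim_ definition above) =====
theorem is_fully_connected_spec : Claim_equal_is_fully_connected := by
  intro maze _hdom hpre
  unfold Spec_is_fully_connected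
  obtain ⟨hne, hrows, y, hy, x, hx, hcell⟩ := hpre
  simp only [List.mem_range] at hy hx
  have hP : PvP maze ((y : Int), (x : Int)) := by
    refine ⟨⟨?_, ?_, ?_, ?_⟩, ?_⟩
    · show (0 : Int) ≤ (y : Int); omega
    · show ((y : Nat) : Int) < (maze.length : Int); omega
    · show (0 : Int) ≤ (x : Int); omega
    · show ((x : Nat) : Int) < ((maze.headD []).length : Int); omega
    · show pvCell maze ((y : Nat) : Int) ((x : Nat) : Int) = 2
      simpa [pvCell] using hcell
  have hmem : ((y : Int), (x : Int)) ∈ pvPath maze maze.length (maze.headD []).length :=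
    mem_pvPath.mpr hP
  obtain ⟨s, rest, hpath⟩ : ∃ s rest, pvPath maze maze.length (maze.headD []).length = s :: rest := by
    cases h : pvPath maze maze.length (maze.headD []).length with
    | nil => rw [h] at hmem; cases hmem
    | cons a l => exact ⟨a, l, rfl⟩
  have hfind : pvFindStart maze maze.length (maze.headD []).length = some s := by
    rw [pvFindStart_eq_head, hpath]; rfl
  have hA := pvA_iff (maze := maze) (s := s) hrows hfind
  have hB := pvB_iff (maze := maze) hpath
  cases hA' : is_fully_connected maze <;> cases hB' : is_fully_connected_alt maze
  · rfl
  · exact absurd (hA.mpr (hB.mp hB')) (by simp [hA'])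
  · exact absurd (hB.mpr (hA.mp hA')) (by simp [hB'])
  · rfl
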